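-- pv_equiv track=rewrite | github.com/Zheruel/advent-of-code-2026 | aoc/day02/solver.py | find_invalid_sum_in_range_optimized
-- ===== SOURCE A (Python) =====
-- def find_invalid_sum_in_range_optimized(start: int, end: int) -> int:
--     """Find sum of all invalid IDs in range using O(1) arithmetic series.
--
--     OPTIMIZATION: Instead of iterating over each base, we use the formula:
--         sum(base * m for base in range(a, b+1)) = m * (b - a + 1) * (a + b) / 2
--
--     This is O(log(max_digits)) instead of O(number of invalid IDs).
--
--     Args:
--         start: Start of range (inclusive)
--         end: End of range (inclusive)
--
--     Returns:
--         Sum of all invalid IDs in the range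
--     """
--     total = 0
--     k = 1
--
--     while True:
--         multiplier = 10**k + 1
--
--         # Valid k-digit bases
--         min_base = 1 if k == 1 else 10 ** (k - 1)
--         max_base = 10**k - 1
--
--         # Early exit if smallest possible number exceeds range
--         if min_base * multiplier > end:
--             break
--
--         # Find bases producing numbers in [start, end]
--         base_min = max(min_base, -(-start // multiplier))  # ceil division
--         base_max = min(max_base, end // multiplier)
--
--         if base_min <= base_max:
--             # Arithmetic series: sum of base_min to base_max
--             count = base_max - base_min + 1
--             sum_of_bases = count * (base_min + base_max) // 2
--             total += multiplier * sum_of_bases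
--
--         k += 1
--
--     return total
-- ===== SOURCE B (Python) =====
-- def find_invalid_sum_in_range_optimized(start: int, end: int) -> int:
--     """Sum of all invalid IDs (a base's digits written twice, e.g. 1212) in [start, end].
--
--     Iterates the invalid IDs themselves in increasing order instead of summing
--     closed-form arithmetic series per digit count.
--     """
--     total = 0
--     base = 1
--     power = 10  # 10 ** (number of digits of base)
--     while True:
--         if base == power:
--             power *= 10
--         num = base * (power + 1)  # base's digits written twice
--         if num > end:
--             break
--         if num >= start:
--             total += num
--         base += 1
--     return total
-- ===== Notes on version B (the rewrite author's own statement) =====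
-- stated objective: simpler
-- what changed: B replaces A's per-digit-count closed-form arithmetic-series summation (with ceiling/floor division and clamping) by a plain loop that enumerates each invalid ID base*(10^digits+1) in increasing order, breaking once it exceeds end.
import Mathlib
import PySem

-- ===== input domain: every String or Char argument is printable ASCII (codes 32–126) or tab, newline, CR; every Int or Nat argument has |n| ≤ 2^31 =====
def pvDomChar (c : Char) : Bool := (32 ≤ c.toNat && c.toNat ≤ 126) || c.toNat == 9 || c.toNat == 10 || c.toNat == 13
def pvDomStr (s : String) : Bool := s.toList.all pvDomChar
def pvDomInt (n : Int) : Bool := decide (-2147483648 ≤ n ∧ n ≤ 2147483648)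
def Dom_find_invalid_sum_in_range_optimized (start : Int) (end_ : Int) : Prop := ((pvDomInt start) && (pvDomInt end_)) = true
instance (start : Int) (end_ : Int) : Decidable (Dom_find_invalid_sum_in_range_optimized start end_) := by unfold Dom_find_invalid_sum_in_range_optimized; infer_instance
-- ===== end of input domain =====

-- B iterates the invalid IDs themselves instead of summing closed-form series per digit
-- count: simpler code, same exact value (proved equal for all inputs).

-- ===== PORT A =====
-- A's locals, as named helpers (multiplier, min_base, max_base, base_min, base_max).
def pvMultiplier (k : Nat) : Int := 10 ^ k + 1
def pvMinBase (k : Nat) : Int := if k = 1 then 1 else 10 ^ (k - 1)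
def pvMaxBase (k : Nat) : Int := 10 ^ k - 1
def pvBaseMin (start : Int) (k : Nat) : Int :=
  max (pvMinBase k) (-(PySem.Int.floordiv (-start) (pvMultiplier k)))
def pvBaseMax (end_ : Int) (k : Nat) : Int :=
  min (pvMaxBase k) (PySem.Int.floordiv end_ (pvMultiplier k))

-- A's while-loop over digit counts k; the `dite` guard is the `break` test.
def pvLoopA (start end_ : Int) (k : Nat) (total : Int) : Int :=
  if h : pvMinBase k * pvMultiplier k > end_ then total
  else
    pvLoopA start end_ (k + 1)
      (if pvBaseMin start k ≤ pvBaseMax end_ k then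
         total + pvMultiplier k *
           (PySem.Int.floordiv
             ((pvBaseMax end_ k - pvBaseMin start k + 1) * (pvBaseMin start k + pvBaseMax end_ k)) 2)
       else total)
termination_by (end_ + 1 - k).toNat
decreasing_by
  have hmb : (1:Int) ≤ pvMinBase k := by
    unfold pvMinBase
    split
    · norm_num
    · exact one_le_pow₀ (by norm_num)
  have hkp : (k:Int) < pvMultiplier k := by
    have h1 : k < 10 ^ k := Nat.lt_pow_self (by norm_num)
    have h2 : (k:Int) < (10:Int) ^ k := by exact_mod_cast h1
    unfold pvMultiplier
    omega
  have hle : pvMinBase k * pvMultiplier k ≤ end_ := not_lt.mp h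
  have hm0 : (0:Int) ≤ pvMultiplier k := by omega
  have hstep : pvMultiplier k ≤ pvMinBase k * pvMultiplier k := le_mul_of_one_le_left hm0 hmb
  omega

def find_invalid_sum_in_range_optimized (start : Int) (end_ : Int) : Int :=
  pvLoopA start end_ 1 0

-- ===== PORT B =====
-- B's locals: power' is `power` after the `if base == power: power *= 10` step, num the ID.
def pvPowerB (base power : Nat) : Nat := if base = power then power * 10 else power
def pvNumB (base power' : Nat) : Int := (base : Int) * ((power' : Int) + 1)

-- B's while-loop over the bases themselves.
def pvLoopB (start end_ : Int) (base power : Nat) (total : Int) : Int :=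
  if h : pvNumB base (pvPowerB base power) > end_ then total
  else pvLoopB start end_ (base + 1) (pvPowerB base power)
         (if pvNumB base (pvPowerB base power) ≥ start then
            total + pvNumB base (pvPowerB base power)
          else total)
termination_by (end_ + 1 - base).toNat
decreasing_by
  have h1 : (base : Int) ≤ pvNumB base (pvPowerB base power) := by
    unfold pvNumB
    nlinarith [Int.natCast_nonneg base, Int.natCast_nonneg (pvPowerB base power)]
  have h2 : pvNumB base (pvPowerB base power) ≤ end_ := not_lt.mp h
  omega

def find_invalid_sum_in_range_optimized_alt (start : Int) (end_ : Int) : Int :=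
  pvLoopB start end_ 1 10 0

-- ===== PRECONDITION & SPEC =====
def Spec_find_invalid_sum_in_range_optimized (start : Int) (end_ : Int) (out : Int) : Prop := out = find_invalid_sum_in_range_optimized_alt start end_
instance (start : Int) (end_ : Int) (out : Int) : Decidable (Spec_find_invalid_sum_in_range_optimized start end_ out) := by unfold Spec_find_invalid_sum_in_range_optimized; infer_instance

-- ===== CLAIM (what is proved, stated in full; the proofs are below) =====
def Claim_equal_find_invalid_sum_in_range_optimized : Prop := ∀ (start : Int) (end_ : Int), Dom_find_invalid_sum_in_range_optimized start end_ → Spec_find_invalid_sum_in_range_optimized start end_ (find_invalid_sum_in_range_optimized start end_)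

-- ===== LEMMAS AND PROOFS =====

-- f b = the invalid ID obtained by writing b's digits twice (for b ≥ 1).
def pvF (b : Nat) : Int := (b : Int) * (10 ^ (Nat.log 10 b + 1) + 1)

-- Upper index bound: every base ≥ pvT produces an ID > end_.
def pvT (end_ : Int) : Nat := end_.toNat + 1

def pvInd (start end_ : Int) (b : Nat) : Int :=
  if start ≤ pvF b ∧ pvF b ≤ end_ then pvF b else 0

-- The common reference value: sum of all in-range invalid IDs with base ≥ a.
def pvS (start end_ : Int) (a : Nat) : Int :=
  ∑ b ∈ Finset.Ico a (pvT end_), pvInd start end_ b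

lemma pvF_ge (b : Nat) : (b:Int) ≤ pvF b := by
  unfold pvF
  have h0 : (0:Int) ≤ (b:Int) := Int.natCast_nonneg b
  have h : (0:Int) < 10 ^ (Nat.log 10 b + 1) := by positivity
  nlinarith

lemma pvF_mono {a b : Nat} (hab : a ≤ b) : pvF a ≤ pvF b := by
  unfold pvF
  have hlog : Nat.log 10 a ≤ Nat.log 10 b := Nat.log_mono_right hab
  have hpow : (10:Int) ^ (Nat.log 10 a + 1) ≤ 10 ^ (Nat.log 10 b + 1) :=
    pow_le_pow_right₀ (by norm_num) (by omega)
  have hab' : (a:Int) ≤ (b:Int) := by exact_mod_cast hab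
  have h0 : (0:Int) ≤ (a:Int) := Int.natCast_nonneg a
  have hp0 : (0:Int) < 10 ^ (Nat.log 10 a + 1) + 1 := by positivity
  nlinarith

lemma pvF_pow (j : Nat) : pvF (10 ^ j) = (10:Int) ^ j * (10 ^ (j + 1) + 1) := by
  unfold pvF
  rw [Nat.log_pow (by norm_num)]
  push_cast
  ring

lemma pvInd_zero_of_ge (start end_ : Int) {b : Nat} (hb : pvT end_ ≤ b) :
    pvInd start end_ b = 0 := by
  unfold pvInd
  have h1 : (b:Int) ≤ pvF b := pvF_ge b
  have h2 : end_ < (b:Int) := by unfold pvT at hb; omega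
  rw [if_neg]
  rintro ⟨-, h⟩
  omega

lemma pvS_empty (start end_ : Int) {a : Nat} (ha : pvT end_ ≤ a) : pvS start end_ a = 0 := by
  unfold pvS
  rw [Finset.Ico_eq_empty (by omega)]
  simp

lemma pvS_zero_of_big (start end_ : Int) {k : Nat} (hk : 1 ≤ k)
    (h : end_ < (10:Int) ^ (k - 1) * (10 ^ k + 1)) :
    pvS start end_ (10 ^ (k - 1)) = 0 := by
  unfold pvS
  apply Finset.sum_eq_zero
  intro b hb
  rw [Finset.mem_Ico] at hb
  have hF : pvF (10 ^ (k - 1)) ≤ pvF b := pvF_mono hb.1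
  rw [pvF_pow] at hF
  have hk1 : k - 1 + 1 = k := by omega
  rw [hk1] at hF
  unfold pvInd
  rw [if_neg]
  rintro ⟨-, hle⟩
  omega

lemma pvS_ext (start end_ : Int) (a m : Nat) (hm : pvT end_ ≤ m) :
    (∑ b ∈ Finset.Ico a m, pvInd start end_ b) = pvS start end_ a := by
  by_cases hle : a ≤ pvT end_
  · rw [← Finset.sum_Ico_consecutive _ hle hm]
    have h0 : (∑ b ∈ Finset.Ico (pvT end_) m, pvInd start end_ b) = 0 := by
      apply Finset.sum_eq_zero
      intro b hb
      rw [Finset.mem_Ico] at hb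
      exact pvInd_zero_of_ge start end_ hb.1
    unfold pvS
    omega
  · rw [pvS_empty start end_ (by omega)]
    apply Finset.sum_eq_zero
    intro b hb
    rw [Finset.mem_Ico] at hb
    exact pvInd_zero_of_ge start end_ (by omega)

lemma pvGaussInt (n : Nat) : (∑ i ∈ Finset.range n, (i:Int)) * 2 = (n:Int) * ((n:Int) - 1) := by
  have h := Finset.sum_range_id_mul_two n
  have h2 : ((((∑ i ∈ Finset.range n, i) * 2 : Nat)) : Int) = (((n * (n - 1) : Nat)) : Int) := by
    exact_mod_cast congrArg (Nat.cast : Nat → Int) h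
  rcases Nat.eq_zero_or_pos n with h0 | h0
  · subst h0; simp
  · have hn1 : ((n - 1 : Nat) : Int) = (n:Int) - 1 := by omega
    push_cast at h2
    rw [hn1] at h2
    push_cast
    omega

-- Gauss: the arithmetic-series closed form A uses, for an Ico of naturals.
lemma pvGauss (a c : Nat) (m : Int) (hac : a ≤ c) :
    (∑ b ∈ Finset.Ico a c, (b:Int) * m)
      = m * PySem.Int.floordiv ((((c:Int) - 1) - a + 1) * (a + ((c:Int) - 1))) 2 := by
  have key : (((c:Int) - 1) - a + 1) * (a + ((c:Int) - 1))
      = (∑ b ∈ Finset.Ico a c, (b:Int)) * 2 := by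
    rw [Finset.sum_Ico_eq_sum_range]
    have hg := pvGaussInt (c - a)
    have hca : ((c - a : Nat) : Int) = (c:Int) - a := by omega
    rw [hca] at hg
    push_cast
    rw [Finset.sum_add_distrib, Finset.sum_const, Finset.card_range, nsmul_eq_mul, hca]
    linear_combination -hg
  have hfd : PySem.Int.floordiv ((((c:Int) - 1) - a + 1) * (a + ((c:Int) - 1))) 2
      = ∑ b ∈ Finset.Ico a c, (b:Int) := by
    rw [PySem.Int.floordiv_eq_iff_of_pos (by norm_num), key]
    omega
  rw [hfd, ← Finset.sum_mul]
  ring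

-- One decade of A's loop equals the reference sum over that decade of bases.
lemma pvDecade (start end_ : Int) (k : Nat) (hk : 1 ≤ k)
    (hle : (10:Int) ^ (k - 1) * (10 ^ k + 1) ≤ end_) :
    (∑ b ∈ Finset.Ico (10 ^ (k - 1) : Nat) (10 ^ k), pvInd start end_ b)
      = (if pvBaseMin start k ≤ pvBaseMax end_ k then
          pvMultiplier k * PySem.Int.floordiv
            ((pvBaseMax end_ k - pvBaseMin start k + 1) * (pvBaseMin start k + pvBaseMax end_ k)) 2
         else 0) := by
  have hminb : pvMinBase k = (10:Int) ^ (k - 1) := by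
    unfold pvMinBase
    split
    · subst_vars; norm_num
    · rfl
  have hm : (0:Int) < pvMultiplier k := by unfold pvMultiplier; positivity
  have hmk : pvMultiplier k = (10:Int) ^ k + 1 := rfl
  set m : Int := pvMultiplier k with hm_def
  set lo : Int := pvBaseMin start k with hlo_def
  set hi : Int := pvBaseMax end_ k with hhi_def
  have hPle : (10:Int) ^ (k - 1) ≤ 10 ^ k - 1 := by
    have h1 : (10:Int) ^ k = 10 ^ (k - 1) * 10 := by
      rw [← pow_succ]
      congr 1
      omega
    have hp : (1:Int) ≤ 10 ^ (k - 1) := one_le_pow₀ (by norm_num)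
    omega
  have hlo1 : (10:Int) ^ (k - 1) ≤ lo := by
    rw [hlo_def]; unfold pvBaseMin; rw [← hm_def, hminb]; exact le_max_left _ _
  have hlo0 : (1:Int) ≤ lo := le_trans (one_le_pow₀ (by norm_num)) hlo1
  have hfd : (10:Int) ^ (k - 1) ≤ PySem.Int.floordiv end_ m :=
    (PySem.Int.le_floordiv_iff_mul_le hm).mpr (by rw [hmk]; exact hle)
  have hhi_left : hi ≤ (10:Int) ^ k - 1 := by
    rw [hhi_def]; unfold pvBaseMax pvMaxBase; rw [← hm_def]; exact min_le_left _ _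
  have hhi0 : (1:Int) ≤ hi := by
    have h1 : (1:Int) ≤ 10 ^ (k - 1) := one_le_pow₀ (by norm_num)
    rw [hhi_def]; unfold pvBaseMax pvMaxBase; rw [← hm_def, le_min_iff]
    exact ⟨by omega, by omega⟩
  have h10 : (((10:Nat) ^ k : Nat) : Int) = (10:Int) ^ k := by push_cast; ring
  have h10' : (((10:Nat) ^ (k - 1) : Nat) : Int) = (10:Int) ^ (k - 1) := by push_cast; ring
  -- each summand becomes a membership test for the clamped interval of bases
  have hstep : ∀ b ∈ Finset.Ico (10 ^ (k - 1) : Nat) (10 ^ k),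
      pvInd start end_ b
        = if b ∈ Finset.Ico lo.toNat (hi.toNat + 1) then (b:Int) * m else 0 := by
    intro b hb
    rw [Finset.mem_Ico] at hb
    have hbl : ((10:Int) ^ (k - 1)) ≤ (b:Int) := by rw [← h10']; exact_mod_cast hb.1
    have hbu : (b:Int) < 10 ^ k := by rw [← h10]; exact_mod_cast hb.2
    have hb0 : b ≠ 0 := by
      have : (1:Nat) ≤ 10 ^ (k - 1) := Nat.one_le_pow _ _ (by norm_num)
      omega
    have hlog : Nat.log 10 b = k - 1 := by
      apply Nat.log_eq_of_pow_le_of_lt_pow hb.1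
      have hkk : k - 1 + 1 = k := by omega
      rw [hkk]
      exact hb.2
    have hFb : pvF b = (b:Int) * m := by
      unfold pvF
      rw [hlog]
      have hkk : k - 1 + 1 = k := by omega
      rw [hkk, hmk]
    have hcond : (start ≤ (b:Int) * m ∧ (b:Int) * m ≤ end_) ↔ (lo ≤ (b:Int) ∧ (b:Int) ≤ hi) := by
      constructor
      · rintro ⟨h1, h2⟩
        constructor
        · rw [hlo_def]; unfold pvBaseMin; rw [← hm_def, hminb, max_le_iff]
          refine ⟨hbl, ?_⟩
          have h3 : (-(b:Int)) ≤ PySem.Int.floordiv (-start) m :=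
            (PySem.Int.le_floordiv_iff_mul_le hm).mpr (by linarith)
          omega
        · rw [hhi_def]; unfold pvBaseMax pvMaxBase; rw [← hm_def, le_min_iff]
          exact ⟨by omega, (PySem.Int.le_floordiv_iff_mul_le hm).mpr h2⟩
      · rintro ⟨h1, h2⟩
        have hlo_ge : -(PySem.Int.floordiv (-start) m) ≤ lo := by
          rw [hlo_def]; unfold pvBaseMin; rw [← hm_def]; exact le_max_right _ _
        have hceil : -(PySem.Int.floordiv (-start) m) ≤ (b:Int) := le_trans hlo_ge h1
        have h3 : ((-(b:Int))) * m ≤ -start :=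
          (PySem.Int.le_floordiv_iff_mul_le hm).mp (by omega)
        have hfd2 : (b:Int) ≤ PySem.Int.floordiv end_ m := by
          refine le_trans h2 ?_
          rw [hhi_def]; unfold pvBaseMax; rw [← hm_def]; exact min_le_right _ _
        have h4 : (b:Int) * m ≤ end_ := (PySem.Int.le_floordiv_iff_mul_le hm).mp hfd2
        exact ⟨by linarith, h4⟩
    have hmem : (lo ≤ (b:Int) ∧ (b:Int) ≤ hi) ↔ b ∈ Finset.Ico lo.toNat (hi.toNat + 1) := by
      rw [Finset.mem_Ico]
      omega
    unfold pvInd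
    rw [hFb]
    exact if_congr (hcond.trans hmem) rfl rfl
  rw [Finset.sum_congr rfl hstep, Finset.sum_ite_mem, Finset.Ico_inter_Ico]
  have hmax : max (10 ^ (k - 1) : Nat) lo.toNat = lo.toNat := by omega
  have hmin : min (10 ^ k : Nat) (hi.toNat + 1) = hi.toNat + 1 := by omega
  rw [hmax, hmin]
  by_cases hlh : lo ≤ hi
  · rw [if_pos hlh]
    have hac : lo.toNat ≤ hi.toNat + 1 := by omega
    rw [pvGauss _ _ m hac]
    have e1 : ((lo.toNat : Int)) = lo := by omega
    have e2 : (((hi.toNat + 1 : Nat) : Int)) = hi + 1 := by push_cast; omega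
    rw [e2, e1]
    ring_nf
  · rw [if_neg (by omega)]
    rw [Finset.Ico_eq_empty (by omega)]
    simp

-- A's loop computes the reference sum from the first base with k digits.
lemma pvLoopA_sum (start end_ : Int) :
    ∀ (n k : Nat) (total : Int), pvT end_ ≤ k + n → 1 ≤ k →
      pvLoopA start end_ k total = total + pvS start end_ (10 ^ (k - 1)) := by
  intro n
  induction n with
  | zero =>
    intro k total hT hk
    have hminb : pvMinBase k = (10:Int) ^ (k - 1) := by
      unfold pvMinBase
      split
      · subst_vars; norm_num
      · rfl
    have hbig : end_ < (10:Int) ^ (k - 1) * (10 ^ k + 1) := by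
      have h1 : (1:Int) ≤ 10 ^ (k - 1) := one_le_pow₀ (by norm_num)
      have h2 : (k:Int) < (10:Int) ^ k := by exact_mod_cast Nat.lt_pow_self (by norm_num)
      have h3 : (10:Int) ^ k + 1 ≤ 10 ^ (k - 1) * (10 ^ k + 1) :=
        le_mul_of_one_le_left (by positivity) h1
      have h4 : end_ < (k:Int) := by unfold pvT at hT; omega
      omega
    rw [pvLoopA, dif_pos (by rw [hminb]; unfold pvMultiplier; exact hbig)]
    rw [pvS_zero_of_big start end_ hk hbig]
    ring
  | succ n ih =>
    intro k total hT hk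
    have hminb : pvMinBase k = (10:Int) ^ (k - 1) := by
      unfold pvMinBase
      split
      · subst_vars; norm_num
      · rfl
    rw [pvLoopA]
    split
    · rename_i hguard
      rw [hminb] at hguard
      unfold pvMultiplier at hguard
      rw [pvS_zero_of_big start end_ hk hguard]
      ring
    · rename_i hguard
      rw [hminb] at hguard
      unfold pvMultiplier at hguard
      have hle : (10:Int) ^ (k - 1) * (10 ^ k + 1) ≤ end_ := not_lt.mp hguard
      rw [ih (k + 1) _ (by omega) (by omega)]
      have hk1 : k + 1 - 1 = k := by omega
      rw [hk1]
      have hPP : (10 ^ (k - 1) : Nat) ≤ 10 ^ k := Nat.pow_le_pow_right (by norm_num) (by omega)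
      have hsplit : pvS start end_ (10 ^ (k - 1))
          = (∑ b ∈ Finset.Ico (10 ^ (k - 1) : Nat) (10 ^ k), pvInd start end_ b)
            + pvS start end_ (10 ^ k) := by
        have hM : pvT end_ ≤ max (10 ^ k) (pvT end_) := le_max_right _ _
        rw [← pvS_ext start end_ (10 ^ (k - 1)) (max (10 ^ k) (pvT end_)) hM]
        rw [← Finset.sum_Ico_consecutive _ hPP (le_max_left _ _)]
        rw [pvS_ext start end_ (10 ^ k) (max (10 ^ k) (pvT end_)) hM]
      rw [hsplit, pvDecade start end_ k hk hle]
      split <;> ring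

-- Invariant-carrying correctness of B's loop: power' = 10 ^ (digits of base).
lemma pvLoopB_sum (start end_ : Int) :
    ∀ (n base power : Nat) (total : Int), pvT end_ ≤ base + n → 1 ≤ base →
      pvPowerB base power = 10 ^ (Nat.log 10 base + 1) →
      pvLoopB start end_ base power total = total + pvS start end_ base := by
  intro n
  induction n with
  | zero =>
    intro base power total hT hb hp
    have hnum : pvNumB base (pvPowerB base power) = pvF base := by
      unfold pvNumB pvF
      rw [hp]
      push_cast
      ring
    rw [pvLoopB, dif_pos]
    · rw [pvS_empty start end_ (by omega)]
      ring
    · rw [hnum]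
      have h1 : (base:Int) ≤ pvF base := pvF_ge base
      have h2 : end_ < (base:Int) := by unfold pvT at hT; omega
      omega
  | succ n ih =>
    intro base power total hT hb hp
    have hnum : pvNumB base (pvPowerB base power) = pvF base := by
      unfold pvNumB pvF
      rw [hp]
      push_cast
      ring
    rw [pvLoopB]
    split
    · rename_i hguard
      rw [hnum] at hguard
      have hz : pvS start end_ base = 0 := by
        unfold pvS
        apply Finset.sum_eq_zero
        intro b hbmem
        rw [Finset.mem_Ico] at hbmem
        have hmono : pvF base ≤ pvF b := pvF_mono hbmem.1
        unfold pvInd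
        rw [if_neg]
        rintro ⟨-, hle2⟩
        omega
      rw [hz]
      ring
    · rename_i hguard
      rw [hnum] at hguard
      have hFle : pvF base ≤ end_ := not_lt.mp hguard
      have hbase_le : (base:Int) ≤ end_ := le_trans (pvF_ge base) hFle
      have hbT : base < pvT end_ := by unfold pvT; omega
      set L := Nat.log 10 base with hL
      have hblt : base < 10 ^ (L + 1) := Nat.lt_pow_succ_log_self (by norm_num) base
      have hp' : pvPowerB (base + 1) (pvPowerB base power) = 10 ^ (Nat.log 10 (base + 1) + 1) := by
        rw [hp]
        unfold pvPowerB
        rcases eq_or_lt_of_le (Nat.succ_le_of_lt hblt) with heq | hlt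
        · have heq' : base + 1 = 10 ^ (L + 1) := heq
          rw [if_pos heq']
          have hlog1 : Nat.log 10 (base + 1) = L + 1 := by
            rw [heq']; exact Nat.log_pow (by norm_num) (L + 1)
          rw [hlog1, ← pow_succ]
        · rw [if_neg (by omega)]
          have hlog1 : Nat.log 10 (base + 1) = L := by
            apply Nat.log_eq_of_pow_le_of_lt_pow
            · exact le_trans (Nat.pow_log_le_self 10 (by omega)) (by omega)
            · exact hlt
          rw [hlog1]
      rw [ih (base + 1) _ _ (by omega) (by omega) hp']
      have hpeel : pvS start end_ base = pvInd start end_ base + pvS start end_ (base + 1) := by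
        unfold pvS
        exact Finset.sum_eq_sum_Ico_succ_bot hbT _
      rw [hpeel]
      have hind : pvInd start end_ base = if start ≤ pvF base then pvF base else 0 := by
        unfold pvInd
        by_cases h : start ≤ pvF base
        · rw [if_pos ⟨h, hFle⟩, if_pos h]
        · rw [if_neg (by rintro ⟨h1, -⟩; omega), if_neg (by omega)]
      rw [hind, hnum]
      by_cases hcmp : start ≤ pvF base
      · rw [if_pos hcmp, if_pos hcmp]
        ring
      · rw [if_neg hcmp, if_neg hcmp]
        ring

-- ===== VERDICT (by name: the statement is the Claim_ definition above) =====
theorem find_invalid_sum_in_range_optimized_spec : Claim_equal_find_invalid_sum_in_range_optimized := by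
  intro start end_ _hdom
  unfold Spec_find_invalid_sum_in_range_optimized
  unfold find_invalid_sum_in_range_optimized find_invalid_sum_in_range_optimized_alt
  rw [pvLoopA_sum start end_ (pvT end_) 1 0 (by omega) (by omega)]
  rw [pvLoopB_sum start end_ (pvT end_) 1 10 0 (by omega) (by omega) (by norm_num [pvPowerB])]
  norm_num
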